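-- pv_equiv track=rewrite | github.com/kukuhua1/alg_practice | subject_list/缓存队列.py | memory_with_write_buffer
-- ===== SOURCE A (Python) =====
-- from typing import List, Tuple
-- import math
-- from collections import deque
--
-- def memory_with_write_buffer(buffer_cap: int, operations: List[Tuple[int, int, int, int]], data: str) -> str:
--     data_list = list(data)
--     buffers = deque()
--     data_to_write = [0] * (len(data) // 2)
--     for operation in operations:
--         op = operation[0]
--         offset = operation[1]
--         length = operation[2]
--         content = operation[3]
--
--         if op == 1:
--             content = hex(content)[2:].upper()
--             for _ in range(2 - len(content)):
--                 content = "0" + content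
--             split_ops = []
--             split_num = math.ceil(length / 8)
--             last_length = length % 8
--             i = 0
--             while i < split_num:
--                 if i == split_num - 1 and last_length != 0:
--                     split_ops.append([op, offset + i * 8, last_length, content])
--                 else:
--                     split_ops.append([op, offset + i * 8, 8, content])
--                 i += 1
--             for split_op in split_ops:
--                 if len(buffers) >= buffer_cap:
--                     op_write = buffers.popleft()
--                     start_idx = op_write[1] * 2
--                     new_str = op_write[3] * op_write[2]
--                     data_list[start_idx:start_idx + len(new_str)] = list(new_str)
--                     for i in range(len(data_to_write)):
--                         if data_to_write[i] != 0:
--                             data_to_write[i] -= 1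
--                 buffers.append(split_op)
--                 index = len(buffers)
--                 for i in range(split_op[1], split_op[1] + split_op[2]):
--                     data_to_write[i] = index
--         elif op == 2:
--             indexs = set()
--             for index in range(offset, offset + length):
--                 if data_to_write[index] != 0:
--                     indexs.add(data_to_write[index])
--             if indexs:
--                 max_index = max(indexs)
--                 to_process = []
--                 for _ in range(max_index):
--                     to_process.append(buffers.popleft())
--                 for op_write in to_process:
--                     start_idx = op_write[1] * 2
--                     new_str = op_write[3] * op_write[2]
--                     data_list[start_idx:start_idx + len(new_str)] = list(new_str)
--                     for i in range(len(data_to_write)):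
--                         if data_to_write[i] != 0:
--                             data_to_write[i] -= 1
--         else:
--             for op_write in buffers:
--                 start_idx = op_write[1] * 2
--                 new_str = op_write[3] * op_write[2]
--                 data_list[start_idx:start_idx + len(new_str)] = list(new_str)
--                 for i in range(len(data_to_write)):
--                     if data_to_write[i] != 0:
--                         data_to_write[i] -= 1
--             buffers.clear()
--     return ''.join(data_list)
-- ===== SOURCE B (Python) =====
-- from typing import List, Tuple
-- from collections import deque
--
-- def memory_with_write_buffer(buffer_cap: int, operations: List[Tuple[int, int, int, int]], data: str) -> str:
--     # Absolute buffer ids + a global popped-offset counter replace A's per-pop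
--     # O(N) decrement sweep over data_to_write.
--     data_list = list(data)
--     dtw = [0] * (len(data) // 2)   # absolute 1-based append id of pending write covering each byte
--     pending = deque()
--     appended = 0                   # total buffers ever appended
--     popped = 0                     # total buffers ever flushed
--     def flush(k):
--         nonlocal popped
--         for _ in range(k):
--             w = pending.popleft()
--             start = w[1] * 2
--             s = w[3] * w[2]
--             data_list[start:start + len(s)] = list(s)
--         popped += k
--     for op, offset, length, content in operations:
--         if op == 1:
--             cs = hex(content)[2:].upper()
--             cs = "0" * (2 - len(cs)) + cs
--             split_num = -(-length // 8)
--             rem = length % 8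
--             for i in range(split_num):
--                 ln = rem if (i == split_num - 1 and rem != 0) else 8
--                 if len(pending) >= buffer_cap:
--                     flush(1)
--                 pending.append((1, offset + i * 8, ln, cs))
--                 appended += 1
--                 for j in range(offset + i * 8, offset + i * 8 + ln):
--                     dtw[j] = appended
--         elif op == 2:
--             m = popped
--             for j in range(offset, offset + length):
--                 if dtw[j] > m:
--                     m = dtw[j]
--             flush(m - popped)
--         else:
--             flush(len(pending))
--     return ''.join(data_list)
-- ===== Notes on version B (the rewrite author's own statement) =====
-- stated objective: faster
-- what changed: B stores absolute 1-based buffer ids in data_to_write together with a single global popped counter (and the number of buffers to flush is computed as a running max), instead of A's per-flush O(N) decrement sweep over the whole data_to_write array and its set-building max; the live relative index A keeps is recovered as id - popped.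
import Mathlib
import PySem

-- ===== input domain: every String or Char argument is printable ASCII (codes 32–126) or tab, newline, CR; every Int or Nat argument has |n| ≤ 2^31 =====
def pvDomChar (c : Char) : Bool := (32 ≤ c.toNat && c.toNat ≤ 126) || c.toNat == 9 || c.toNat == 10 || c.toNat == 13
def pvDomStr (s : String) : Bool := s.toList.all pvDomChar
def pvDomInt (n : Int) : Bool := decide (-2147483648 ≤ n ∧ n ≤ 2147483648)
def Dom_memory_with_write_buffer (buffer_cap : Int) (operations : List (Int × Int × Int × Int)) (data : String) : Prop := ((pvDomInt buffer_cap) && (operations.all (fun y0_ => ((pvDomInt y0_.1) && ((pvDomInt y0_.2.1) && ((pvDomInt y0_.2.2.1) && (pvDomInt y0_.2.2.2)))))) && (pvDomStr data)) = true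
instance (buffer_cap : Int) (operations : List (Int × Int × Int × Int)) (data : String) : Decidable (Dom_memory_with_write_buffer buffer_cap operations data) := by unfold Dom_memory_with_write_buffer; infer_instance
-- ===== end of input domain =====

-- B replaces A's per-flush O(N) decrement sweep over data_to_write by absolute
-- buffer ids plus a global popped-offset counter (objective: faster).

-- ---- shared Python-semantics helpers (exact on the stated inputs) ----

-- uppercase hex digit of n < 16
def pvHexDigit (n : Nat) : Char := if n < 10 then Char.ofNat (48 + n) else Char.ofNat (55 + n)

-- uppercase hex digits of a Nat (no prefix); hex(n)[2:].upper() for n ≥ 0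
def pvHexNat (n : Nat) : List Char :=
  if _h : n < 16 then [pvHexDigit n]
  else pvHexNat (n / 16) ++ [pvHexDigit (n % 16)]
decreasing_by exact Nat.div_lt_self (by omega) (by norm_num)

-- hex(content)[2:].upper() — exact for every Int: hex(-n) = '-0x…' so [2:] keeps 'x…'
def pvHexUpper (content : Int) : List Char :=
  if content < 0 then 'X' :: pvHexNat content.natAbs else pvHexNat content.toNat

-- Python list slice assignment l[a:a+len(new)] = new (step 1), exact clamped-index
-- semantics (may grow/shrink the list, as in Python); hand-ported: PySem has no slice-set
def pvSliceSet (l : List Char) (a : Int) (new : List Char) : List Char :=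
  let a' : Nat := PySem.List.clampIdx l.length a
  let b' : Nat := max (PySem.List.clampIdx l.length (a + new.length)) a'
  l.take a' ++ new ++ l.drop b'

-- ===== PORT A =====

-- a buffered write [op, offset, length, content-string]
abbrev pvBuf := Int × Int × Int × List Char
-- A's mutable state: data_list, buffers, data_to_write
structure pvSA where
  dl : List Char
  bufs : List pvBuf
  dtw : List Int

-- apply one buffered write to data_list
def pvAWrite (dl : List Char) (w : pvBuf) : List Char :=
  pvSliceSet dl (w.2.1 * 2) (PySem.List.pyRepeat w.2.2.2 w.2.2.1)

-- A's flush of one popped buffer: the write plus the whole-array decrement loop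
-- 'for i in range(len(data_to_write)): if data_to_write[i] != 0: data_to_write[i] -= 1'
def pvAFlush1 (dl : List Char) (dtw : List Int) (w : pvBuf) : List Char × List Int :=
  (pvAWrite dl w, dtw.map (fun v => if v ≠ 0 then v - 1 else v))

-- body of A's 'for split_op in split_ops' loop
def pvAIter (cap : Int) (s : pvSA) (sop : pvBuf) : pvSA :=
  let s :=
    if (s.bufs.length : Int) ≥ cap then
      match s.bufs with
      | [] => s          -- Python: IndexError (popleft from empty deque); outside Pre_
      | w :: rest =>
        let r := pvAFlush1 s.dl s.dtw w
        ⟨r.1, rest, r.2⟩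
    else s
  let bufs := s.bufs ++ [sop]
  let index : Int := bufs.length
  let dtw := (PySem.List.pyRange sop.2.1 (sop.2.1 + sop.2.2.1) 1).foldl
      (fun d i => PySem.List.pySetD d i index) s.dtw
  ⟨s.dl, bufs, dtw⟩

-- one iteration of 'for operation in operations'
def pvAStep (cap : Int) (s : pvSA) (o : Int × Int × Int × Int) : pvSA :=
  let op := o.1
  let offset := o.2.1
  let length := o.2.2.1
  let content := o.2.2.2
  if op = 1 then
    let cs0 := pvHexUpper content
    let cs := (List.range (2 - cs0.length)).foldl (fun c _ => '0' :: c) cs0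
    -- math.ceil(length/8) = -((-length)//8), exact for |length| ≤ 2^31 ≪ 2^53
    let splitNum := -(PySem.Int.floordiv (-length) 8)
    let lastLength := PySem.Int.mod length 8
    let splitOps := (PySem.List.pyRange 0 splitNum 1).map (fun i =>
        if i = splitNum - 1 ∧ lastLength ≠ 0 then (op, offset + i * 8, lastLength, cs)
        else (op, offset + i * 8, 8, cs))
    splitOps.foldl (pvAIter cap) s
  else if op = 2 then
    let indexs := (PySem.List.pyRange offset (offset + length) 1).foldl
        (fun st idx =>
          let v := PySem.List.pyGetD s.dtw idx 0
          if v ≠ 0 then PySem.Set.add st v else st)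
        (PySem.Set.ofList ([] : List Int))
    if indexs ≠ [] then
      let maxIndex := (PySem.List.max? indexs (fun x => x)).getD 0
      -- 'for _ in range(max_index): to_process.append(buffers.popleft())'
      let toProcess := s.bufs.take maxIndex.toNat
      let rest := s.bufs.drop maxIndex.toNat
      let r := toProcess.foldl (fun (pr : List Char × List Int) w => pvAFlush1 pr.1 pr.2 w)
          (s.dl, s.dtw)
      ⟨r.1, rest, r.2⟩
    else s
  else
    let r := s.bufs.foldl (fun (pr : List Char × List Int) w => pvAFlush1 pr.1 pr.2 w)
        (s.dl, s.dtw)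
    ⟨r.1, [], r.2⟩

def memory_with_write_buffer (buffer_cap : Int) (operations : List (Int × Int × Int × Int)) (data : String) : String :=
  let s := operations.foldl (pvAStep buffer_cap)
      ⟨data.toList, [], List.replicate (data.toList.length / 2) 0⟩
  String.ofList s.dl

-- ===== PORT B =====

-- B's state: data_list, pending deque, absolute-id data_to_write, appended, popped
structure pvSB where
  dl : List Char
  pend : List pvBuf
  dtw : List Int
  app : Int
  pop : Int

def pvBWrite (dl : List Char) (w : pvBuf) : List Char :=
  pvSliceSet dl (w.2.1 * 2) (PySem.List.pyRepeat w.2.2.2 w.2.2.1)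

-- 'for _ in range(k): w = pending.popleft(); <apply write>'
def pvBFlushLoop : Nat → List Char → List pvBuf → List Char × List pvBuf
  | 0, dl, p => (dl, p)
  | _ + 1, dl, [] => (dl, [])   -- Python: IndexError; outside Pre_
  | k + 1, dl, w :: rest => pvBFlushLoop k (pvBWrite dl w) rest

def pvBFlush (s : pvSB) (k : Int) : pvSB :=
  let r := pvBFlushLoop k.toNat s.dl s.pend
  ⟨r.1, r.2, s.dtw, s.app, s.pop + k⟩

-- body of B's 'for i in range(split_num)' loop
def pvBIter (cap offset splitNum rem : Int) (cs : List Char) (s : pvSB) (i : Int) : pvSB :=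
  let ln := if i = splitNum - 1 ∧ rem ≠ 0 then rem else 8
  let s := if (s.pend.length : Int) ≥ cap then pvBFlush s 1 else s
  let pend := s.pend ++ [((1 : Int), offset + i * 8, ln, cs)]
  let app := s.app + 1
  let dtw := (PySem.List.pyRange (offset + i * 8) (offset + i * 8 + ln) 1).foldl
      (fun d j => PySem.List.pySetD d j app) s.dtw
  ⟨s.dl, pend, dtw, app, s.pop⟩

def pvBStep (cap : Int) (s : pvSB) (o : Int × Int × Int × Int) : pvSB :=
  let op := o.1
  let offset := o.2.1
  let length := o.2.2.1
  let content := o.2.2.2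
  if op = 1 then
    let cs0 := pvHexUpper content
    let cs := List.replicate (2 - cs0.length) '0' ++ cs0
    let splitNum := -(PySem.Int.floordiv (-length) 8)   -- ceil(length/8)
    let rem := PySem.Int.mod length 8
    (PySem.List.pyRange 0 splitNum 1).foldl (pvBIter cap offset splitNum rem cs) s
  else if op = 2 then
    let m := (PySem.List.pyRange offset (offset + length) 1).foldl
        (fun m j =>
          let v := PySem.List.pyGetD s.dtw j 0
          if v > m then v else m) s.pop
    pvBFlush s (m - s.pop)
  else
    pvBFlush s (s.pend.length)

def memory_with_write_buffer_alt (buffer_cap : Int) (operations : List (Int × Int × Int × Int)) (data : String) : String :=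
  let s := operations.foldl (pvBStep buffer_cap)
      ⟨data.toList, [], List.replicate (data.toList.length / 2) 0, 0, 0⟩
  String.ofList s.dl

-- ===== PRECONDITION & SPEC =====

-- Pre_ is exactly the set of inputs on which the Python A returns normally: it excludes
-- (a) operations of kind 1 or 2 whose byte range leaves Python's valid index range of
-- data_to_write (A raises IndexError there), and (b) buffer_cap < 1 together with an
-- effective write operation (A then pops from an empty deque: IndexError).
def Pre_memory_with_write_buffer (buffer_cap : Int) (operations : List (Int × Int × Int × Int)) (data : String) : Prop :=
  (∀ o ∈ operations, (o.1 = 1 ∨ o.1 = 2) → 1 ≤ o.2.2.1 →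
      (-((data.toList.length / 2 : Nat) : Int) ≤ o.2.1 ∧
        o.2.1 + o.2.2.1 ≤ ((data.toList.length / 2 : Nat) : Int)))
  ∧ (1 ≤ buffer_cap ∨ ∀ o ∈ operations, ¬(o.1 = 1 ∧ 1 ≤ o.2.2.1))
instance (buffer_cap : Int) (operations : List (Int × Int × Int × Int)) (data : String) : Decidable (Pre_memory_with_write_buffer buffer_cap operations data) := by
  unfold Pre_memory_with_write_buffer; infer_instance

def pvWitness_memory_with_write_buffer : Int × (List (Int × Int × Int × Int)) × String :=
  (2, [(1, 0, 3, 255), (2, 0, 2, 0), (3, 0, 0, 0)], "00112233")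

def Spec_memory_with_write_buffer (buffer_cap : Int) (operations : List (Int × Int × Int × Int)) (data : String) (out : String) : Prop := out = memory_with_write_buffer_alt buffer_cap operations data
instance (buffer_cap : Int) (operations : List (Int × Int × Int × Int)) (data : String) (out : String) : Decidable (Spec_memory_with_write_buffer buffer_cap operations data out) := by unfold Spec_memory_with_write_buffer; infer_instance

-- ===== CLAIM (what is proved, stated in full; the proofs are below) =====
def Claim_equal_memory_with_write_buffer : Prop := ∀ (buffer_cap : Int) (operations : List (Int × Int × Int × Int)) (data : String), Dom_memory_with_write_buffer buffer_cap operations data → Pre_memory_with_write_buffer buffer_cap operations data → Spec_memory_with_write_buffer buffer_cap operations data (memory_with_write_buffer buffer_cap operations data)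

-- ===== LEMMAS AND PROOFS =====

-- abstraction function: A's state as a view of B's state
def pvRel (p v : Int) : Int := max (v - p) 0
def pvPhi (s : pvSB) : pvSA := ⟨s.dl, s.pend, s.dtw.map (pvRel s.pop)⟩
-- invariant on B's state
def pvInv (s : pvSB) : Prop :=
  s.app = s.pop + s.pend.length ∧ (∀ v ∈ s.dtw, v ≤ s.app) ∧ 0 ≤ s.pop

theorem pv_foldl_sim {α β γ : Type} (f : γ → β) (Inv : γ → Prop)
    (g : β → α → β) (h : γ → α → γ) (l : List α)
    (hstep : ∀ s x, x ∈ l → Inv s → g (f s) x = f (h s x) ∧ Inv (h s x)) :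
    ∀ s, Inv s → l.foldl g (f s) = f (l.foldl h s) ∧ Inv (l.foldl h s) := by
  induction l with
  | nil => intro s hs; exact ⟨rfl, hs⟩
  | cons x t ih =>
    intro s hs
    have h1 := hstep s x (by simp) hs
    rw [List.foldl_cons, List.foldl_cons, h1.1]
    exact ih (fun s y hy hs' => hstep s y (by simp [hy]) hs') (h s x) h1.2

theorem pv_pad (n : Nat) (cs : List Char) :
    (List.range n).foldl (fun c _ => '0' :: c) cs = List.replicate n '0' ++ cs := by
  induction n with
  | zero => simp
  | succ n ih => rw [List.range_succ, List.foldl_append, ih]; simp [List.replicate_succ]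

theorem pv_decmap (dtw : List Int) (p : Int) :
    (dtw.map (pvRel p)).map (fun v => if v ≠ 0 then v - 1 else v) = dtw.map (pvRel (p + 1)) := by
  simp only [List.map_map]
  congr 1
  funext v
  simp only [Function.comp, pvRel]
  split_ifs <;> omega

theorem pv_setD_map {α β : Type} (f : α → β) (xs : List α) (i : Int) (v : α) :
    (PySem.List.pySetD xs i v).map f = PySem.List.pySetD (xs.map f) i (f v) := by
  unfold PySem.List.pySetD PySem.List.pySet?
  rw [List.length_map]
  cases h : PySem.List.pyIdx? xs.length i <;> simp [List.map_set]

theorem pv_mem_setD {α : Type} {w : α} {xs : List α} {i : Int} {v : α}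
    (h : w ∈ PySem.List.pySetD xs i v) : w ∈ xs ∨ w = v := by
  unfold PySem.List.pySetD PySem.List.pySet? at h
  cases hi : PySem.List.pyIdx? xs.length i with
  | none => rw [hi] at h; exact Or.inl h
  | some k => rw [hi] at h; exact List.mem_or_eq_of_mem_set h

theorem pv_getD_mem_or {α : Type} (xs : List α) (i : Int) (d : α) :
    PySem.List.pyGetD xs i d ∈ xs ∨ PySem.List.pyGetD xs i d = d := by
  unfold PySem.List.pyGetD PySem.List.pyGet?
  cases hi : PySem.List.pyIdx? xs.length i with
  | none => simp
  | some k =>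
    simp only [Option.bind_some]
    cases hk : xs[k]? with
    | none => simp
    | some a => exact Or.inl (by simpa using List.mem_of_getElem? hk)

-- flushing k ≤ |p| buffers: A's pop-and-decrement fold equals B's flush loop
theorem pv_flush_sim (k : Nat) (p : List pvBuf) (dl : List Char) (dtw : List Int) (q : Int)
    (hk : k ≤ p.length) :
    (p.take k).foldl (fun (pr : List Char × List Int) w => pvAFlush1 pr.1 pr.2 w)
        (dl, dtw.map (pvRel q))
      = ((pvBFlushLoop k dl p).1, dtw.map (pvRel (q + k)))
    ∧ (pvBFlushLoop k dl p).2 = p.drop k := by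
  induction k generalizing p dl q with
  | zero => simp [pvBFlushLoop]
  | succ k ih =>
    cases p with
    | nil => simp at hk
    | cons w rest =>
      simp only [List.take_succ_cons, List.foldl_cons, pvBFlushLoop]
      have h1 : pvAFlush1 dl (dtw.map (pvRel q)) w = (pvBWrite dl w, dtw.map (pvRel (q + 1))) := by
        unfold pvAFlush1
        rw [pv_decmap]
        rfl
      rw [h1]
      have hrec := ih rest (pvBWrite dl w) (q + 1) (by simpa using hk)
      have e : q + 1 + (k : Int) = q + ((k : Nat) + 1 : Nat) := by push_cast; ring
      refine ⟨?_, ?_⟩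
      · rw [hrec.1, e]
      · rw [hrec.2, List.drop_succ_cons]

-- fold of pySetD commutes with map
theorem pv_fold_setD_map {α β : Type} (f : α → β) (l : List Int) (xs : List α) (v : α) :
    (l.foldl (fun d j => PySem.List.pySetD d j v) xs).map f
      = l.foldl (fun d j => PySem.List.pySetD d j (f v)) (xs.map f) := by
  induction l generalizing xs with
  | nil => rfl
  | cons j t ih => rw [List.foldl_cons, List.foldl_cons, ih, pv_setD_map]

theorem pv_fold_setD_mem {α : Type} {w : α} (l : List Int) (xs : List α) (v : α)
    (h : w ∈ l.foldl (fun d j => PySem.List.pySetD d j v) xs) : w ∈ xs ∨ w = v := by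
  induction l generalizing xs with
  | nil => exact Or.inl h
  | cons j t ih =>
    rw [List.foldl_cons] at h
    rcases ih _ h with h' | h'
    · exact pv_mem_setD h'
    · exact Or.inr h'

-- membership in A's fold-built index set
theorem pv_setfold_mem (f : Int → Int) (l : List Int) (S0 : PySem.Set Int) (x : Int) :
    x ∈ l.foldl (fun st v => if f v ≠ 0 then PySem.Set.add st (f v) else st) S0
      ↔ x ∈ S0 ∨ ∃ v ∈ l, f v ≠ 0 ∧ x = f v := by
  induction l generalizing S0 with
  | nil => simp
  | cons v t ih =>
    rw [List.foldl_cons]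
    by_cases hv : f v ≠ 0
    · rw [if_pos hv, ih, PySem.Set.mem_add]
      constructor
      · rintro (⟨h | h⟩ | ⟨u, hu, h1, h2⟩)
        · exact Or.inl h
        · exact Or.inr ⟨v, List.mem_cons_self, hv, h⟩
        · exact Or.inr ⟨u, List.mem_cons_of_mem _ hu, h1, h2⟩
      · rintro (h | ⟨u, hu, h1, h2⟩)
        · exact Or.inl (Or.inl h)
        · rcases List.mem_cons.mp hu with rfl | hu'
          · exact Or.inl (Or.inr h2)
          · exact Or.inr ⟨u, hu', h1, h2⟩
    · rw [if_neg hv, ih]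
      constructor
      · rintro (h | ⟨u, hu, h1, h2⟩)
        · exact Or.inl h
        · exact Or.inr ⟨u, List.mem_cons_of_mem _ hu, h1, h2⟩
      · rintro (h | ⟨u, hu, h1, h2⟩)
        · exact Or.inl h
        · rcases List.mem_cons.mp hu with rfl | hu'
          · exact absurd h1 hv
          · exact Or.inr ⟨u, hu', h1, h2⟩

-- B's running max equals foldl max
theorem pv_foldmax (l : List Int) (p : Int) :
    l.foldl (fun m v => if v > m then v else m) p = l.foldl max p := by
  induction l generalizing p with
  | nil => rfl
  | cons v t ih =>
    rw [List.foldl_cons, List.foldl_cons, ih]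
    congr 1
    split <;> omega

-- pvRel p v is nonzero exactly for live absolute ids
theorem pv_rel_ne (p v : Int) : pvRel p v ≠ 0 ↔ p < v := by
  simp only [pvRel]; omega

-- either the default is returned or the element itself (same for any default)
theorem pv_getD_default (xs : List Int) (j : Int) (p : Int) :
    PySem.List.pyGetD xs j p = PySem.List.pyGetD xs j 0 ∨
      (PySem.List.pyGetD xs j p = p ∧ PySem.List.pyGetD xs j 0 = 0) := by
  unfold PySem.List.pyGetD
  cases PySem.List.pyGet? xs j <;> simp

-- the heart of the op == 2 case: A's max over its set of live relative ids
-- is B's running max of absolute ids minus the popped counter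
theorem pv_op2_core (dtw R : List Int) (p app : Int) (S : List Int) (m : Int)
    (hS : S = R.foldl (fun st idx =>
        if PySem.List.pyGetD (dtw.map (pvRel p)) idx 0 ≠ 0
        then PySem.Set.add st (PySem.List.pyGetD (dtw.map (pvRel p)) idx 0) else st)
        (PySem.Set.ofList ([] : List Int)))
    (hm : m = R.foldl (fun acc j =>
        if PySem.List.pyGetD dtw j 0 > acc then PySem.List.pyGetD dtw j 0 else acc) p)
    (hp : 0 ≤ p) (happ : ∀ v ∈ dtw, v ≤ app) (hpa : p ≤ app) :
    (p ≤ m ∧ m ≤ app) ∧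
      ((S = [] ∧ m = p) ∨ (S ≠ [] ∧ PySem.List.max? S (fun x => x) = some (m - p))) := by
  have hread : ∀ idx : Int, PySem.List.pyGetD (dtw.map (pvRel p)) idx 0
      = pvRel p (PySem.List.pyGetD dtw idx p) := by
    intro idx
    have h0 : PySem.List.pyGetD (dtw.map (pvRel p)) idx 0
        = PySem.List.pyGetD (dtw.map (pvRel p)) idx (pvRel p p) := by
      have : pvRel p p = 0 := by simp [pvRel]
      rw [this]
    rw [h0, PySem.List.pyGetD_map]
  -- m is a foldl max over the read values
  have hm' : m = (R.map (fun j => PySem.List.pyGetD dtw j 0)).foldl max p := by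
    rw [hm, ← pv_foldmax, List.foldl_map]
  -- membership in S
  have hSmem : ∀ x, x ∈ S ↔
      ∃ j ∈ R, pvRel p (PySem.List.pyGetD dtw j p) ≠ 0
        ∧ x = pvRel p (PySem.List.pyGetD dtw j p) := by
    intro x
    rw [hS]
    have : (fun (st : PySem.Set Int) idx =>
        if PySem.List.pyGetD (dtw.map (pvRel p)) idx 0 ≠ 0
        then PySem.Set.add st (PySem.List.pyGetD (dtw.map (pvRel p)) idx 0) else st)
      = (fun (st : PySem.Set Int) idx =>
        if pvRel p (PySem.List.pyGetD dtw idx p) ≠ 0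
        then PySem.Set.add st (pvRel p (PySem.List.pyGetD dtw idx p)) else st) := by
      funext st idx; rw [hread]
    rw [this, show R.foldl (fun (st : PySem.Set Int) idx =>
        if pvRel p (PySem.List.pyGetD dtw idx p) ≠ 0
        then PySem.Set.add st (pvRel p (PySem.List.pyGetD dtw idx p)) else st)
        (PySem.Set.ofList ([] : List Int))
      = (R.map (fun j => PySem.List.pyGetD dtw j p)).foldl
        (fun (st : PySem.Set Int) v => if pvRel p v ≠ 0 then PySem.Set.add st (pvRel p v) else st)
        (PySem.Set.ofList ([] : List Int)) from by rw [List.foldl_map],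
      pv_setfold_mem]
    constructor
    · rintro (h | ⟨v, hvm, h1, h2⟩)
      · simp at h
      · rcases List.mem_map.mp hvm with ⟨j, hj, rfl⟩
        exact ⟨j, hj, h1, h2⟩
    · rintro ⟨j, hj, h1, h2⟩
      exact Or.inr ⟨_, List.mem_map_of_mem hj, h1, h2⟩
  have hmax := PySem.List.le_foldl_max (R.map (fun j => PySem.List.pyGetD dtw j 0)) p
  have hmem := PySem.List.foldl_max_mem (R.map (fun j => PySem.List.pyGetD dtw j 0)) p
  rw [← hm'] at hmax hmem
  have hZapp : ∀ v ∈ R.map (fun j => PySem.List.pyGetD dtw j 0), v ≤ app := by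
    intro v hvm
    rcases List.mem_map.mp hvm with ⟨j, _, rfl⟩
    rcases pv_getD_mem_or dtw j (0 : Int) with h | h
    · exact happ _ h
    · omega
  have hmapp : m ≤ app := by
    rcases hmem with h | h
    · omega
    · exact hZapp _ h
  refine ⟨⟨hmax.1, hmapp⟩, ?_⟩
  by_cases hex : ∃ j ∈ R, p < PySem.List.pyGetD dtw j 0
  · right
    obtain ⟨j0, hj0, hv0⟩ := hex
    have hmgt : p < m := lt_of_lt_of_le hv0 (hmax.2 _ (List.mem_map_of_mem hj0))
    have hmZ : m ∈ R.map (fun j => PySem.List.pyGetD dtw j 0) := by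
      rcases hmem with h | h
      · omega
      · exact h
    rcases List.mem_map.mp hmZ with ⟨j1, hj1, hj1v⟩
    have hj1p : PySem.List.pyGetD dtw j1 p = m := by
      rcases pv_getD_default dtw j1 p with h | h
      · rw [h, hj1v]
      · omega
    have hmpS : (m - p) ∈ S := by
      rw [hSmem]
      refine ⟨j1, hj1, ?_, ?_⟩
      · rw [hj1p, pv_rel_ne]; exact hmgt
      · rw [hj1p]; simp only [pvRel]; omega
    have hSne : S ≠ [] := List.ne_nil_of_mem hmpS
    refine ⟨hSne, ?_⟩
    cases hM : PySem.List.max? S (fun x => x) with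
    | none => exact absurd ((PySem.List.max?_eq_none_iff S _).mp hM) hSne
    | some M =>
      have hMS := PySem.List.max?_mem hM
      have hMle : M ≤ m - p := by
        rcases (hSmem M).mp hMS with ⟨j, hj, h1, h2⟩
        have hjp : p < PySem.List.pyGetD dtw j p := (pv_rel_ne _ _).mp h1
        have hjz : PySem.List.pyGetD dtw j p = PySem.List.pyGetD dtw j 0 := by
          rcases pv_getD_default dtw j p with h | h
          · exact h
          · omega
        have : PySem.List.pyGetD dtw j p ≤ m := by
          rw [hjz]; exact hmax.2 _ (List.mem_map_of_mem hj)
        rw [h2]; simp only [pvRel]; omega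
      have hgeM : m - p ≤ M := PySem.List.max?_isMax hM _ hmpS
      rw [le_antisymm hMle hgeM]
  · left
    push Not at hex
    have hmp : m = p := by
      rcases hmem with h | h
      · exact h
      · rcases List.mem_map.mp h with ⟨j, hj, hjv⟩
        have := hex j hj
        omega
    refine ⟨?_, hmp⟩
    rw [List.eq_nil_iff_forall_not_mem]
    intro x hx
    rcases (hSmem x).mp hx with ⟨j, hj, h1, _⟩
    have hjp : p < PySem.List.pyGetD dtw j p := (pv_rel_ne _ _).mp h1
    rcases pv_getD_default dtw j p with h | h
    · have := hex j hj; omega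
    · omega

-- one iteration of the split loop (op == 1), under buffer_cap ≥ 1
theorem pv_iter_sim (cap offset splitNum rem : Int) (cs : List Char)
    (hcap : 1 ≤ cap) (s : pvSB) (i : Int) (hs : pvInv s) :
    pvAIter cap (pvPhi s)
        (if i = splitNum - 1 ∧ rem ≠ 0 then ((1:Int), offset + i * 8, rem, cs)
         else ((1:Int), offset + i * 8, 8, cs))
      = pvPhi (pvBIter cap offset splitNum rem cs s i)
    ∧ pvInv (pvBIter cap offset splitNum rem cs s i) := by
  have hsop : (if i = splitNum - 1 ∧ rem ≠ 0 then ((1:Int), offset + i * 8, rem, cs)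
      else ((1:Int), offset + i * 8, 8, cs))
      = ((1:Int), offset + i * 8, (if i = splitNum - 1 ∧ rem ≠ 0 then rem else 8), cs) := by
    split <;> rfl
  rw [hsop]
  obtain ⟨ha, hv, hp⟩ := hs
  by_cases hc : ((s.pend.length : Int) ≥ cap)
  · cases hpd : s.pend with
    | nil =>
      exfalso
      rw [hpd] at hc
      simp at hc
      omega
    | cons w rest =>
      have hlen : s.app = s.pop + ((rest.length : Int) + 1) := by
        rw [hpd] at ha
        simp [List.length_cons] at ha
        omega
      have hBf : pvBFlush s 1 = ⟨pvBWrite s.dl w, rest, s.dtw, s.app, s.pop + 1⟩ := by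
        unfold pvBFlush
        rw [hpd]
        rfl
      have hidx : pvRel (s.pop + 1) (s.app + 1) = (rest.length : Int) + 1 := by
        simp only [pvRel]; omega
      simp only [pvAIter, pvBIter, pvPhi, hpd, List.length_cons, hBf]
      have hc2 : (((rest.length + 1 : Nat)) : Int) ≥ cap := by
        rw [hpd] at hc; simpa using hc
      rw [if_pos hc2, if_pos hc2]
      simp only [pvAFlush1, pv_decmap, pvAWrite, pvSA.mk.injEq]
      refine ⟨⟨rfl, trivial, ?_⟩, ?_, ?_, ?_⟩
      · rw [pv_fold_setD_map, hidx]
        simp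
      · dsimp only
        simp only [List.length_append, List.length_cons, List.length_nil]
        push_cast
        omega
      · intro v hvm
        simp only at hvm ⊢
        rcases pv_fold_setD_mem _ _ _ hvm with h | h
        · have := hv v h; omega
        · omega
      · simp only
        omega
  · have hidx2 : pvRel s.pop (s.app + 1) = (s.pend.length : Int) + 1 := by
      simp only [pvRel]; omega
    simp only [pvAIter, pvBIter, pvPhi]
    rw [if_neg hc, if_neg hc]
    simp only [pvSA.mk.injEq]
    refine ⟨⟨trivial, trivial, ?_⟩, ?_, ?_, ?_⟩
    · rw [pv_fold_setD_map, hidx2]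
      simp
    · dsimp only
      simp only [List.length_append, List.length_cons, List.length_nil]
      push_cast
      omega
    · intro v hvm
      simp only at hvm ⊢
      rcases pv_fold_setD_mem _ _ _ hvm with h | h
      · have := hv v h; omega
      · omega
    · simp only
      omega

-- the per-operation simulation
theorem pv_step_sim (cap : Int) (o : Int × Int × Int × Int) (s : pvSB)
    (hcap : o.1 = 1 → 1 ≤ o.2.2.1 → 1 ≤ cap) (hs : pvInv s) :
    pvAStep cap (pvPhi s) o = pvPhi (pvBStep cap s o) ∧ pvInv (pvBStep cap s o) := by
  obtain ⟨op, offset, length, content⟩ := o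
  simp only at hcap
  by_cases h1 : op = 1
  · subst h1
    simp only [pvAStep, pvBStep]
    rw [pv_pad, List.foldl_map]
    by_cases hl : 1 ≤ length
    · exact pv_foldl_sim pvPhi pvInv _ _ _
        (fun s i _ hs => pv_iter_sim cap offset _ _ _ (hcap rfl hl) s i hs) s hs
    · have hnil : PySem.List.pyRange 0 (-(PySem.Int.floordiv (-length) 8)) 1 = [] := by
        apply PySem.List.pyRange_one_eq_nil
        have h8 : (0:Int) < 8 := by norm_num
        have : 0 ≤ PySem.Int.floordiv (-length) 8 := by
          rw [PySem.Int.floordiv_eq_ediv_of_pos h8]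
          exact Int.ediv_nonneg (by omega) (by omega)
        omega
      rw [hnil]
      exact ⟨rfl, hs⟩
  · by_cases h2 : op = 2
    · subst h2
      obtain ⟨ha, hv, hp⟩ := hs
      simp only [pvAStep, pvBStep, if_neg h1, if_true, pvPhi]
      set S := List.foldl (fun (st : PySem.Set Int) idx =>
          if PySem.List.pyGetD (s.dtw.map (pvRel s.pop)) idx 0 ≠ 0
          then PySem.Set.add st (PySem.List.pyGetD (s.dtw.map (pvRel s.pop)) idx 0) else st)
          (PySem.Set.ofList ([] : List Int))
          (PySem.List.pyRange offset (offset + length) 1) with hSdef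
      set m := List.foldl (fun acc j =>
          if PySem.List.pyGetD s.dtw j 0 > acc then PySem.List.pyGetD s.dtw j 0 else acc)
          s.pop (PySem.List.pyRange offset (offset + length) 1) with hmdef
      have core := pv_op2_core s.dtw (PySem.List.pyRange offset (offset + length) 1)
        s.pop s.app S m hSdef hmdef hp hv (by omega)
      rcases core with ⟨⟨hpm, hma⟩, hcase⟩
      rcases hcase with ⟨hSnil, hmp⟩ | ⟨hSne, hmax⟩
      · rw [if_neg (by simp [hSnil])]
        have hB0 : pvBFlush s (m - s.pop) = s := by
          rw [hmp]
          unfold pvBFlush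
          simp [pvBFlushLoop]
        rw [hB0]
        exact ⟨rfl, ha, hv, hp⟩
      · rw [if_pos hSne, hmax]
        simp only [Option.getD_some]
        have hk : (m - s.pop).toNat ≤ s.pend.length := by omega
        have hflush := pv_flush_sim (m - s.pop).toNat s.pend s.dl s.dtw s.pop hk
        rw [hflush.1]
        have hBf : pvBFlush s (m - s.pop) =
            ⟨(pvBFlushLoop (m - s.pop).toNat s.dl s.pend).1,
             (pvBFlushLoop (m - s.pop).toNat s.dl s.pend).2,
             s.dtw, s.app, s.pop + (m - s.pop)⟩ := by
          unfold pvBFlush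
          rfl
        rw [hBf]
        have hcast : s.pop + ((m - s.pop).toNat : Int) = s.pop + (m - s.pop) := by omega
        have hlen2 : (pvBFlushLoop (m - s.pop).toNat s.dl s.pend).2.length
            = s.pend.length - (m - s.pop).toNat := by
          rw [hflush.2, List.length_drop]
        refine ⟨?_, ?_, ?_, ?_⟩
        · simp only [pvSA.mk.injEq, hcast]
          exact ⟨trivial, hflush.2.symm, trivial⟩
        · dsimp only
          rw [hlen2]
          push_cast [hk]
          omega
        · intro v hvm
          simp only at hvm ⊢
          exact le_trans (hv v hvm) (le_refl _)
        · dsimp only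
          omega
    · simp only [pvAStep, pvBStep, if_neg h1, if_neg h2, pvPhi]
      obtain ⟨ha, hv, hp⟩ := hs
      have hflush := pv_flush_sim s.pend.length s.pend s.dl s.dtw s.pop (le_refl _)
      rw [List.take_length] at hflush
      rw [hflush.1]
      have hBf : pvBFlush s (s.pend.length : Int) =
          ⟨(pvBFlushLoop s.pend.length s.dl s.pend).1,
           (pvBFlushLoop s.pend.length s.dl s.pend).2,
           s.dtw, s.app, s.pop + (s.pend.length : Int)⟩ := by
        unfold pvBFlush
        rw [Int.toNat_natCast]
      rw [hBf]
      have hdrop : (pvBFlushLoop s.pend.length s.dl s.pend).2 = [] := by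
        rw [hflush.2, List.drop_length]
      refine ⟨?_, ?_, ?_, ?_⟩
      · simp only [hdrop]
      · dsimp only
        rw [hdrop]
        simp
        omega
      · intro v hvm
        simp only at hvm ⊢
        exact hv v hvm
      · dsimp only
        omega

-- ===== VERDICT (by name: the statement is the Claim_ definition above) =====
theorem memory_with_write_buffer_spec : Claim_equal_memory_with_write_buffer := by
  intro cap ops data _ hpre
  unfold Spec_memory_with_write_buffer memory_with_write_buffer memory_with_write_buffer_alt
  have hcap : ∀ o ∈ ops, o.1 = 1 → 1 ≤ o.2.2.1 → 1 ≤ cap := by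
    rcases hpre.2 with h | h
    · intro o _ _ _; exact h
    · intro o ho h1 h2; exact absurd ⟨h1, h2⟩ (h o ho)
  have h0 : pvInv ⟨data.toList, [], List.replicate (data.toList.length / 2) 0, 0, 0⟩ := by
    refine ⟨by simp, ?_, le_refl 0⟩
    intro v hv
    simp [List.eq_of_mem_replicate hv]
  have hφ : (⟨data.toList, [], List.replicate (data.toList.length / 2) 0⟩ : pvSA)
      = pvPhi ⟨data.toList, [], List.replicate (data.toList.length / 2) 0, 0, 0⟩ := by
    simp [pvPhi, pvRel]
  rw [hφ]
  have := pv_foldl_sim pvPhi pvInv (pvAStep cap) (pvBStep cap) ops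
    (fun s o ho hs => pv_step_sim cap o s (hcap o ho) hs) _ h0
  rw [this.1]
  rfl
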